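-- pv_equiv track=rewrite | github.com/pypi-data/pypi-mirror-60 | packages/lark-parser/lark-parser-0.8.0.tar.gz/lark-parser-0.8.0/lark/parsers/lalr_analysis.py | digraph
-- ===== SOURCE A (Python) =====
-- def digraph(X, R, G):
--     F = {}
--     S = []
--     N = {}
--     for x in X:
--         N[x] = 0
--     for x in X:
--         # this is always true for the first iteration, but N[x] may be updated in traverse below
--         if N[x] == 0:
--             traverse(x, S, N, X, R, G, F)
--     return F
--
-- def traverse(x, S, N, X, R, G, F):
--     S.append(x)
--     d = len(S)
--     N[x] = d
--     F[x] = G[x]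
--     for y in R[x]:
--         if N[y] == 0:
--             traverse(y, S, N, X, R, G, F)
--         n_x = N[x]
--         assert(n_x > 0)
--         n_y = N[y]
--         assert(n_y != 0)
--         if (n_y > 0) and (n_y < n_x):
--             N[x] = n_y
--         F[x].update(F[y])
--     if N[x] == d:
--         f_x = F[x]
--         while True:
--             z = S.pop()
--             N[z] = -1
--             F[z] = f_x
--             if z == x:
--                 break
-- ===== SOURCE B (Python) =====
-- def digraph(X, R, G):
--     F = {}
--     S = []
--     N = {}
--     for x in X:
--         N[x] = 0
--     for root in X:
--         if N[root] == 0: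
--             _visit(root, S, N, R, G, F)
--     return F
--
-- def _visit(root, S, N, R, G, F):
--     # iterative DFS with an explicit frame stack; frame = [node, d, edge index]
--     S.append(root)
--     N[root] = len(S)
--     F[root] = G[root]
--     stack = [[root, len(S), 0]]
--     while stack:
--         frame = stack[-1]
--         x, d, i = frame
--         edges = R[x]
--         if i < len(edges):
--             y = edges[i]
--             if N[y] == 0:
--                 S.append(y)
--                 N[y] = len(S)
--                 F[y] = G[y]
--                 stack.append([y, len(S), 0])
--             else:
--                 n_y = N[y]
--                 if 0 < n_y < N[x]:
--                     N[x] = n_y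
--                 F[x].update(F[y])
--                 frame[2] = i + 1
--         else:
--             if N[x] == d:
--                 f_x = F[x]
--                 while True:
--                     z = S.pop()
--                     N[z] = -1
--                     F[z] = f_x
--                     if z == x:
--                         break
--             stack.pop()
-- ===== Notes on version B (the rewrite author's own statement) =====
-- stated objective: alternative
-- what changed: The recursive traverse is replaced by an iterative DFS driven by an explicit stack of (node, entry-depth, edge-position) frames inlined into a helper, interleaving the N-minimisation, F-updates and SCC pop in the original order.
import Mathlib
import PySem

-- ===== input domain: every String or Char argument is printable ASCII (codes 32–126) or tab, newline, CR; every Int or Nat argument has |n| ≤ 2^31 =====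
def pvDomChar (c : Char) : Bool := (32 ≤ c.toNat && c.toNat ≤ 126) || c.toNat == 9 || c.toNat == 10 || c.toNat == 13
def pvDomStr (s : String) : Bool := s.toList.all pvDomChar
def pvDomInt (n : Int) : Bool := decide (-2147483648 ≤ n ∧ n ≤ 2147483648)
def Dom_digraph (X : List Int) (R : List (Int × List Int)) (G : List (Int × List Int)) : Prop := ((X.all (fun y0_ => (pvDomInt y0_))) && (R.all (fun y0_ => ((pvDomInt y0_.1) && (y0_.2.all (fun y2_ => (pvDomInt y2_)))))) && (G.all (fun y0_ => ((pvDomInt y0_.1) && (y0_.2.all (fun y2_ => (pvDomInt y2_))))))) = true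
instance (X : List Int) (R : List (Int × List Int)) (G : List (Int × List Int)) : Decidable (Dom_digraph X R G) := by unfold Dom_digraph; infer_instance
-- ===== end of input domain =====

-- B rewrites the recursive `traverse` as an iterative DFS over an explicit frame stack (objective:
-- alternative decomposition, same cost).  Equivalence is about the RETURN value only: the Python A
-- (and B alike) mutates the sets stored in G in place (F[x] = G[x] aliasing).

-- Shared state of the algorithm: the node stack S (head = top), the index dict N
-- and the result dict F (set values modelled as PySem.Set Int).
structure DgSt where
  S : List Int
  N : PySem.Dict Int Int
  F : PySem.Dict Int (List Int)
deriving Repr, DecidableEq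

-- first visit of x: S.append(x); N[x] = len(S); F[x] = G[x]
def dgEnter (G : PySem.Dict Int (List Int)) (x : Int) (st : DgSt) : DgSt :=
  let S' := x :: st.S
  { S := S', N := st.N.insert x (S'.length : Int), F := st.F.insert x (G.getD x []) }

-- edge bookkeeping after y is known visited: the conditional N[x] = min and F[x].update(F[y])
def dgEdge (x y : Int) (st : DgSt) : DgSt :=
  { S := st.S
    N := if 0 < st.N.getD y 0 ∧ st.N.getD y 0 < st.N.getD x 0 then st.N.insert x (st.N.getD y 0)
         else st.N
    F := st.F.insert x (PySem.Set.update (st.F.getD x []) (st.F.getD y [])) }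

-- the `while True: z = S.pop(); N[z] = -1; F[z] = f_x; if z == x: break` loop
def dgPopLoop (x : Int) (fx : List Int) : List Int → DgSt → DgSt
  | [], st => st
  | z :: rest, st =>
    let st' : DgSt := { S := rest, N := st.N.insert z (-1), F := st.F.insert z fx }
    if z = x then st' else dgPopLoop x fx rest st'

-- `if N[x] == d:` pop the SCC of x
def dgPop (x : Int) (d : Int) (st : DgSt) : DgSt :=
  if st.N.getD x 0 = d then dgPopLoop x (st.F.getD x []) st.S st else st

-- the initial N: `for x in X: N[x] = 0`
def dgInit (X : List Int) : PySem.Dict Int Int :=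
  X.foldl (fun (N : PySem.Dict Int Int) x => N.insert x 0) PySem.Dict.empty

-- fuel bound: no traversal can nest deeper than the number of distinct mentioned nodes
def dgFuelA (X : List Int) (Rd : PySem.Dict Int (List Int)) : Nat :=
  (PySem.List.dedup (X ++ Rd.values.flatten)).length + 1

-- ===== PORT A =====
-- recursive `traverse` (fuel = recursion depth; none = fuel exhausted, proved unreachable)
mutual
def dgTravA (Rd Gd : PySem.Dict Int (List Int)) : Nat → Int → DgSt → Option DgSt
  | 0, _, _ => none
  | f + 1, x, st =>
    (dgLoopA Rd Gd f x (Rd.getD x []) (dgEnter Gd x st)).map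
      (dgPop x (((dgEnter Gd x st).S.length : Int)))
  termination_by f _ _ => (f, 0)

def dgLoopA (Rd Gd : PySem.Dict Int (List Int)) : Nat → Int → List Int → DgSt → Option DgSt
  | _, _, [], st => some st
  | f, x, y :: ys, st =>
    if st.N.getD y 0 = 0 then
      match dgTravA Rd Gd f y st with
      | none => none
      | some ry => dgLoopA Rd Gd f x ys (dgEdge x y ry)
    else
      dgLoopA Rd Gd f x ys (dgEdge x y st)
  termination_by f _ ys _ => (f, ys.length + 1)
end

def digraph (X : List Int) (R : List (Int × List Int)) (G : List (Int × List Int)) : List (Int × List Int) :=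
  let Rd := PySem.Dict.ofList R
  let Gd := PySem.Dict.ofList G
  let st0 : DgSt := { S := [], N := dgInit X, F := PySem.Dict.empty }
  let fA := dgFuelA X Rd
  let res := X.foldl
    (fun (o : Option DgSt) x =>
      match o with
      | none => none
      | some st => if st.N.getD x 0 = 0 then dgTravA Rd Gd fA x st else some st)
    (some st0)
  match res with
  | some st => st.F.items
  | none => []

-- ===== PORT B =====
-- fuel bound for the machine (one unit per machine step), enough to simulate dgFuelA levels
def dgFuelB (E : Nat) : Nat → Nat
  | 0 => 0
  | f + 1 => 1 + E * (2 + dgFuelB E f)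

-- iterative DFS: a stack of frames (node x, its entry depth d, remaining edges of R[x])
def dgRunB (Rd Gd : PySem.Dict Int (List Int)) : Nat → List (Int × Int × List Int) → DgSt → Option DgSt
  | 0, _, _ => none
  | _ + 1, [], st => some st
  | f + 1, (x, d, []) :: K, st => dgRunB Rd Gd f K (dgPop x d st)
  | f + 1, (x, d, y :: ys) :: K, st =>
    if st.N.getD y 0 = 0 then
      dgRunB Rd Gd f
        ((y, ((dgEnter Gd y st).S.length : Int), Rd.getD y []) :: (x, d, y :: ys) :: K)
        (dgEnter Gd y st)
    else
      dgRunB Rd Gd f ((x, d, ys) :: K) (dgEdge x y st)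

def digraph_alt (X : List Int) (R : List (Int × List Int)) (G : List (Int × List Int)) : List (Int × List Int) :=
  let Rd := PySem.Dict.ofList R
  let Gd := PySem.Dict.ofList G
  let st0 : DgSt := { S := [], N := dgInit X, F := PySem.Dict.empty }
  let fB := dgFuelB ((Rd.values.map List.length).sum) (dgFuelA X Rd) + 1
  let res := X.foldl
    (fun (o : Option DgSt) x =>
      match o with
      | none => none
      | some st =>
        if st.N.getD x 0 = 0 then
          let st1 := dgEnter Gd x st
          dgRunB Rd Gd fB [(x, (st1.S.length : Int), Rd.getD x [])] st1
        else some st)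
    (some st0)
  match res with
  | some st => st.F.items
  | none => []

-- ===== PRECONDITION & SPEC =====
-- Pre_ excludes exactly the inputs on which the Python A raises KeyError: some x in X without an
-- entry in R or in G, or an R-successor of an x in X that is not itself in X (its N[y] is read).
def Pre_digraph (X : List Int) (R : List (Int × List Int)) (G : List (Int × List Int)) : Prop :=
  ∀ x ∈ X, (PySem.Dict.ofList R).contains x = true ∧ (PySem.Dict.ofList G).contains x = true ∧
    ∀ y ∈ (PySem.Dict.ofList R).getD x [], y ∈ X
instance (X : List Int) (R : List (Int × List Int)) (G : List (Int × List Int)) : Decidable (Pre_digraph X R G) := by unfold Pre_digraph; infer_instance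

def pvWitness_digraph : List Int × (List (Int × List Int)) × (List (Int × List Int)) :=
  ([0, 1], [(0, [1]), (1, [0])], [(0, [5]), (1, [6])])

def Spec_digraph (X : List Int) (R : List (Int × List Int)) (G : List (Int × List Int)) (out : List (Int × List Int)) : Prop := out = digraph_alt X R G
instance (X : List Int) (R : List (Int × List Int)) (G : List (Int × List Int)) (out : List (Int × List Int)) : Decidable (Spec_digraph X R G out) := by unfold Spec_digraph; infer_instance

-- ===== CLAIM (what is proved, stated in full; the proofs are below) =====
def Claim_equal_digraph : Prop := ∀ (X : List Int) (R : List (Int × List Int)) (G : List (Int × List Int)), Dom_digraph X R G → Pre_digraph X R G → Spec_digraph X R G (digraph X R G)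

-- ===== LEMMAS AND PROOFS =====

-- number of nodes of U whose N-entry is 0 (the termination / fuel measure)
def dgZeros (U : List Int) (st : DgSt) : Nat := U.countP (fun v => decide (st.N.getD v 0 = 0))

theorem dg_countP_lt {α : Type} (l : List α) (p q : α → Bool)
    (h : ∀ a ∈ l, q a = true → p a = true) (x : α) (hx : x ∈ l)
    (hp : p x = true) (hq : q x = false) : l.countP q < l.countP p := by
  induction l with
  | nil => cases hx
  | cons a l ih =>
    simp only [List.countP_cons]
    have hhead : (if q a = true then 1 else 0) ≤ (if p a = true then 1 else 0) := by
      by_cases hqa : q a = true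
      · rw [if_pos hqa, if_pos (h a List.mem_cons_self hqa)]
      · simp [hqa]
    rcases List.mem_cons.mp hx with rfl | hxl
    · have hle : l.countP q ≤ l.countP p :=
        List.countP_mono_left (fun a ha => h a (List.mem_cons_of_mem _ ha))
      rw [hp, hq]
      simpa using Nat.lt_succ_of_le hle
    · have hlt : l.countP q < l.countP p :=
        ih (fun a ha => h a (List.mem_cons_of_mem _ ha)) hxl
      omega

theorem dgEnter_N_getD (G : PySem.Dict Int (List Int)) (x : Int) (st : DgSt) (v : Int) :
    (dgEnter G x st).N.getD v 0 = if v = x then ((x :: st.S).length : Int) else st.N.getD v 0 := by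
  simp [dgEnter, PySem.Dict.getD_insert]

theorem dgEnter_N_zero (G : PySem.Dict Int (List Int)) (x : Int) (st : DgSt) (v : Int)
    (h : (dgEnter G x st).N.getD v 0 = 0) : st.N.getD v 0 = 0 := by
  rw [dgEnter_N_getD] at h
  split at h
  · simp at h; omega
  · exact h

theorem dgEdge_N_zero (x y v : Int) (st : DgSt) (h : (dgEdge x y st).N.getD v 0 = 0) :
    st.N.getD v 0 = 0 := by
  unfold dgEdge at h
  split at h
  · rw [PySem.Dict.getD_insert] at h
    split at h
    · omega
    · exact h
  · exact h

theorem dgPopLoop_N_zero (x : Int) (fx : List Int) (S : List Int) (st : DgSt) (v : Int)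
    (h : (dgPopLoop x fx S st).N.getD v 0 = 0) : st.N.getD v 0 = 0 := by
  induction S generalizing st with
  | nil => simpa [dgPopLoop] using h
  | cons z rest ih =>
    rw [dgPopLoop] at h
    split at h
    · rw [PySem.Dict.getD_insert] at h
      split at h
      · omega
      · exact h
    · have h2 := ih _ h
      dsimp only at h2
      rw [PySem.Dict.getD_insert] at h2
      split at h2
      · omega
      · exact h2

theorem dgPop_N_zero (x : Int) (d : Int) (st : DgSt) (v : Int)
    (h : (dgPop x d st).N.getD v 0 = 0) : st.N.getD v 0 = 0 := by
  unfold dgPop at h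
  split at h
  · exact dgPopLoop_N_zero _ _ _ _ _ h
  · exact h

theorem dgZeros_enter_le (U : List Int) (G : PySem.Dict Int (List Int)) (x : Int) (st : DgSt) :
    dgZeros U (dgEnter G x st) ≤ dgZeros U st := by
  apply List.countP_mono_left
  intro a _ ha
  simp only [decide_eq_true_eq] at *
  rw [dgEnter_N_getD] at ha
  split at ha
  · simp at ha; omega
  · exact ha

theorem dgZeros_enter_lt (U : List Int) (G : PySem.Dict Int (List Int)) (x : Int) (st : DgSt)
    (hx : x ∈ U) (h0 : st.N.getD x 0 = 0) : dgZeros U (dgEnter G x st) < dgZeros U st := by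
  apply dg_countP_lt U _ _ _ x hx
  · simp [h0]
  · simp only [dgEnter_N_getD, decide_eq_false_iff_not]
    simp
    omega
  · intro a _ ha
    simp only [decide_eq_true_eq] at *
    rw [dgEnter_N_getD] at ha
    split at ha
    · simp at ha; omega
    · exact ha

theorem dgZeros_edge_le (U : List Int) (x y : Int) (st : DgSt) :
    dgZeros U (dgEdge x y st) ≤ dgZeros U st := by
  apply List.countP_mono_left
  intro a _ ha
  simp only [decide_eq_true_eq] at *
  exact dgEdge_N_zero _ _ _ _ ha

theorem dgZeros_pop_le (U : List Int) (x : Int) (d : Int) (st : DgSt) :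
    dgZeros U (dgPop x d st) ≤ dgZeros U st := by
  apply List.countP_mono_left
  intro a _ ha
  simp only [decide_eq_true_eq] at *
  exact dgPop_N_zero _ _ _ _ ha

-- zero-count never grows and nonzero entries stay nonzero through traverse / its edge loop
theorem dgZN (Rd Gd : PySem.Dict Int (List Int)) (U : List Int) : ∀ f : Nat,
    (∀ x st r, dgTravA Rd Gd f x st = some r →
      dgZeros U r ≤ dgZeros U st ∧ ∀ v, (r.N.getD v 0 = 0 → st.N.getD v 0 = 0)) ∧
    (∀ x ys st r, dgLoopA Rd Gd f x ys st = some r →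
      dgZeros U r ≤ dgZeros U st ∧ ∀ v, (r.N.getD v 0 = 0 → st.N.getD v 0 = 0)) := by
  intro f
  induction f using Nat.strong_induction_on with
  | _ f IH =>
    have trav : ∀ x st r, dgTravA Rd Gd f x st = some r →
        dgZeros U r ≤ dgZeros U st ∧ ∀ v, (r.N.getD v 0 = 0 → st.N.getD v 0 = 0) := by
      intro x st r h
      cases f with
      | zero => rw [dgTravA] at h; cases h
      | succ f' =>
        rw [dgTravA] at h
        cases hl : dgLoopA Rd Gd f' x (Rd.getD x []) (dgEnter Gd x st) with
        | none => rw [hl] at h; cases h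
        | some r0 =>
          rw [hl] at h
          simp only [Option.map_some, Option.some.injEq] at h
          subst h
          obtain ⟨hz, hnz⟩ := (IH f' (Nat.lt_succ_self f')).2 x _ _ _ hl
          constructor
          · exact le_trans (dgZeros_pop_le U _ _ _) (le_trans hz (dgZeros_enter_le U _ _ _))
          · intro v hv
            exact dgEnter_N_zero _ _ _ _ (hnz v (dgPop_N_zero _ _ _ _ hv))
    refine ⟨trav, ?_⟩
    intro x ys
    induction ys with
    | nil =>
      intro st r h
      rw [dgLoopA] at h
      cases h
      exact ⟨le_refl _, fun v hv => hv⟩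
    | cons y ys ihy =>
      intro st r h
      rw [dgLoopA] at h
      split at h
      · cases ht : dgTravA Rd Gd f y st with
        | none => rw [ht] at h; cases h
        | some ry =>
          rw [ht] at h
          obtain ⟨hz1, hnz1⟩ := trav _ _ _ ht
          obtain ⟨hz2, hnz2⟩ := ihy _ _ h
          constructor
          · exact le_trans hz2 (le_trans (dgZeros_edge_le U _ _ _) hz1)
          · intro v hv
            exact hnz1 v (dgEdge_N_zero _ _ _ _ (hnz2 v hv))
      · obtain ⟨hz2, hnz2⟩ := ihy _ _ h
        constructor
        · exact le_trans hz2 (dgZeros_edge_le U _ _ _)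
        · intro v hv
          exact dgEdge_N_zero _ _ _ _ (hnz2 v hv)

theorem dgTrav_nz_self (Rd Gd : PySem.Dict Int (List Int)) (f : Nat) (y : Int) (st ry : DgSt)
    (h : dgTravA Rd Gd f y st = some ry) : ¬ ry.N.getD y 0 = 0 := by
  cases f with
  | zero => rw [dgTravA] at h; cases h
  | succ f' =>
    rw [dgTravA] at h
    cases hl : dgLoopA Rd Gd f' y (Rd.getD y []) (dgEnter Gd y st) with
    | none => rw [hl] at h; cases h
    | some r0 =>
      rw [hl] at h
      simp only [Option.map_some, Option.some.injEq] at h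
      subst h
      intro hv
      have h0 := (dgZN Rd Gd [] f').2 y _ _ _ hl |>.2 y (dgPop_N_zero _ _ _ _ hv)
      rw [dgEnter_N_getD, if_pos rfl] at h0
      simp at h0
      omega

theorem dgTot (Rd Gd : PySem.Dict Int (List Int)) (U : List Int)
    (hU : ∀ x : Int, ∀ y ∈ Rd.getD x [], y ∈ U) : ∀ f : Nat,
    (∀ x st, x ∈ U → st.N.getD x 0 = 0 → dgZeros U st < f → (dgTravA Rd Gd f x st).isSome) ∧
    (∀ x ys st, (∀ y ∈ ys, y ∈ U) → dgZeros U st < f → (dgLoopA Rd Gd f x ys st).isSome) := by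
  intro f
  induction f using Nat.strong_induction_on with
  | _ f IH =>
    have loopIH : ∀ f' : Nat, f' < f → ∀ x ys st, (∀ y ∈ ys, y ∈ U) → dgZeros U st < f' →
        (dgLoopA Rd Gd f' x ys st).isSome := fun f' hf' => (IH f' hf').2
    have trav : ∀ x st, x ∈ U → st.N.getD x 0 = 0 → dgZeros U st < f →
        (dgTravA Rd Gd f x st).isSome := by
      intro x st hx h0 hz
      cases f with
      | zero => omega
      | succ f' =>
        rw [dgTravA]
        rw [Option.isSome_map]
        apply loopIH f' (Nat.lt_succ_self f') x _ _ (hU x)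
        exact lt_of_lt_of_le (dgZeros_enter_lt U Gd x st hx h0) (Nat.lt_succ_iff.mp hz)
    refine ⟨trav, ?_⟩
    intro x ys
    induction ys with
    | nil => intro st _ _; rw [dgLoopA]; rfl
    | cons y ys ihy =>
      intro st hys hz
      rw [dgLoopA]
      split
      · rename_i hy0
        cases ht : dgTravA Rd Gd f y st with
        | none =>
          have := trav y st (hys y List.mem_cons_self) hy0 hz
          rw [ht] at this; cases this
        | some ry =>
          have hzry := ((dgZN Rd Gd U f).1 y st ry ht).1
          exact ihy _ (fun y' hy' => hys y' (List.mem_cons_of_mem _ hy'))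
            (lt_of_le_of_lt (le_trans (dgZeros_edge_le U x y ry) hzry) hz)
      · exact ihy _ (fun y' hy' => hys y' (List.mem_cons_of_mem _ hy'))
          (lt_of_le_of_lt (dgZeros_edge_le U x y st) hz)

theorem dgRunB_mono (Rd Gd : PySem.Dict Int (List Int)) (f : Nat) :
    ∀ K st r, dgRunB Rd Gd f K st = some r → dgRunB Rd Gd (f + 1) K st = some r := by
  induction f with
  | zero => intro K st r h; rw [dgRunB] at h; cases h
  | succ f ih =>
    intro K st r h
    match K with
    | [] => rw [dgRunB] at h ⊢; exact h
    | (x, d, []) :: K =>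
      rw [dgRunB] at h ⊢
      exact ih _ _ _ h
    | (x, d, y :: ys) :: K =>
      rw [dgRunB] at h ⊢
      split at h
      · rw [if_pos (by assumption)]
        exact ih _ _ _ h
      · rw [if_neg (by assumption)]
        exact ih _ _ _ h

theorem dgRunB_mono_le (Rd Gd : PySem.Dict Int (List Int)) (f g : Nat) (h : f ≤ g) :
    ∀ K st r, dgRunB Rd Gd f K st = some r → dgRunB Rd Gd g K st = some r := by
  intro K st r h0
  induction g, h using Nat.le_induction with
  | base => exact h0
  | succ g _ ih => exact dgRunB_mono Rd Gd g _ _ _ ih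

-- the simulation: the explicit-stack machine reproduces the recursive traverse, step for step
theorem dgSIM (Rd Gd : PySem.Dict Int (List Int)) (E : Nat)
    (hE : ∀ y : Int, (Rd.getD y []).length ≤ E) : ∀ f : Nat,
    (∀ x st r, dgTravA Rd Gd f x st = some r →
      ∀ K g out, dgRunB Rd Gd g K r = some out →
        dgRunB Rd Gd (g + dgFuelB E f)
          ((x, ((dgEnter Gd x st).S.length : Int), Rd.getD x []) :: K) (dgEnter Gd x st) = some out) ∧
    (∀ x d ys st r, dgLoopA Rd Gd f x ys st = some r →
      ∀ K g out, dgRunB Rd Gd g K (dgPop x d r) = some out →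
        dgRunB Rd Gd (g + (1 + ys.length * (2 + dgFuelB E f))) ((x, d, ys) :: K) st = some out) := by
  intro f
  induction f using Nat.strong_induction_on with
  | _ f IH =>
    have trav : ∀ x st r, dgTravA Rd Gd f x st = some r →
        ∀ K g out, dgRunB Rd Gd g K r = some out →
          dgRunB Rd Gd (g + dgFuelB E f)
            ((x, ((dgEnter Gd x st).S.length : Int), Rd.getD x []) :: K) (dgEnter Gd x st) = some out := by
      intro x st r h K g out hrun
      cases f with
      | zero => rw [dgTravA] at h; cases h
      | succ f' =>
        rw [dgTravA] at h
        cases hl : dgLoopA Rd Gd f' x (Rd.getD x []) (dgEnter Gd x st) with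
        | none => rw [hl] at h; cases h
        | some r0 =>
          rw [hl] at h
          simp only [Option.map_some, Option.some.injEq] at h
          subst h
          have base := (IH f' (Nat.lt_succ_self f')).2 x ((dgEnter Gd x st).S.length : Int)
            (Rd.getD x []) _ _ hl K g out hrun
          have hfuel : g + (1 + (Rd.getD x []).length * (2 + dgFuelB E f')) ≤
              g + dgFuelB E (f' + 1) := by
            rw [dgFuelB]
            have := Nat.mul_le_mul_right (2 + dgFuelB E f') (hE x)
            omega
          exact dgRunB_mono_le Rd Gd _ _ hfuel _ _ _ base
    refine ⟨trav, ?_⟩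
    intro x d ys
    induction ys with
    | nil =>
      intro st r h K g out hrun
      rw [dgLoopA] at h
      cases h
      have e : g + (1 + List.length ([] : List Int) * (2 + dgFuelB E f)) = g + 1 := by
        simp
      rw [e, dgRunB]
      exact hrun
    | cons y ys ihy =>
      intro st r h K g out hrun
      rw [dgLoopA] at h
      split at h
      · rename_i hy0
        cases ht : dgTravA Rd Gd f y st with
        | none => rw [ht] at h; cases h
        | some ry =>
          rw [ht] at h
          have hnz : ¬ ry.N.getD y 0 = 0 := dgTrav_nz_self Rd Gd f y st ry ht
          have step2 : dgRunB Rd Gd ((g + (1 + ys.length * (2 + dgFuelB E f))) + 1)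
              ((x, d, y :: ys) :: K) ry = some out := by
            rw [dgRunB, if_neg hnz]
            exact ihy _ _ h K g out hrun
          have child := trav y st ry ht ((x, d, y :: ys) :: K)
            ((g + (1 + ys.length * (2 + dgFuelB E f))) + 1) out step2
          have e : g + (1 + (y :: ys).length * (2 + dgFuelB E f)) =
              (((g + (1 + ys.length * (2 + dgFuelB E f))) + 1) + dgFuelB E f) + 1 := by
            simp only [List.length_cons]
            ring
          rw [e, dgRunB, if_pos hy0]
          exact child
      · rename_i hy0
        have step := ihy _ _ h K g out hrun
        have e : g + (1 + (y :: ys).length * (2 + dgFuelB E f)) =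
            ((g + (1 + ys.length * (2 + dgFuelB E f))) + (1 + dgFuelB E f)) + 1 := by
          simp only [List.length_cons]
          ring
        rw [e, dgRunB, if_neg hy0]
        exact dgRunB_mono_le Rd Gd _ _ (Nat.le_add_right _ _) _ _ _ step

theorem dg_fold_eq (X : List Int) (Rd Gd : PySem.Dict Int (List Int))
    (U : List Int) (hUdef : U = PySem.List.dedup (X ++ Rd.values.flatten))
    (E : Nat) (hEdef : E = (Rd.values.map List.length).sum) :
    ∀ (X' : List Int) (st : DgSt), (∀ x ∈ X', x ∈ U) →
      X'.foldl (fun (o : Option DgSt) x =>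
          match o with
          | none => none
          | some st => if st.N.getD x 0 = 0 then dgTravA Rd Gd (dgFuelA X Rd) x st else some st)
        (some st) =
      X'.foldl (fun (o : Option DgSt) x =>
          match o with
          | none => none
          | some st =>
            if st.N.getD x 0 = 0 then
              let st1 := dgEnter Gd x st
              dgRunB Rd Gd (dgFuelB ((Rd.values.map List.length).sum) (dgFuelA X Rd) + 1)
                [(x, (st1.S.length : Int), Rd.getD x [])] st1
            else some st)
        (some st) := by
  have hU : ∀ x : Int, ∀ y ∈ Rd.getD x [], y ∈ U := by
    intro x y hy
    rw [PySem.Dict.getD_eq_get?_getD] at hy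
    cases hg : Rd.get? x with
    | none => rw [hg] at hy; cases hy
    | some v =>
      rw [hg] at hy
      have hv : v ∈ Rd.values := by
        have hm := PySem.Dict.mem_items_of_get?_eq_some Rd hg
        simp only [PySem.Dict.values]
        exact List.mem_map.mpr ⟨(x, v), hm, rfl⟩
      rw [hUdef]
      exact (PySem.List.mem_dedup _ _).mpr
        (List.mem_append.mpr (Or.inr (List.mem_flatten.mpr ⟨v, hv, hy⟩)))
  have hE : ∀ y : Int, (Rd.getD y []).length ≤ E := by
    intro y
    rw [PySem.Dict.getD_eq_get?_getD]
    cases hg : Rd.get? y with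
    | none => simp
    | some v =>
      have hv : v ∈ Rd.values := by
        have hm := PySem.Dict.mem_items_of_get?_eq_some Rd hg
        simp only [PySem.Dict.values]
        exact List.mem_map.mpr ⟨(y, v), hm, rfl⟩
      rw [hEdef]
      simp only [Option.getD_some]
      exact List.single_le_sum (fun n _ => Nat.zero_le n) v.length
        (List.mem_map.mpr ⟨v, hv, rfl⟩)
  intro X' st hmem
  induction X' generalizing st with
  | nil => rfl
  | cons x X' ihX =>
    simp only [List.foldl_cons]
    by_cases hx0 : st.N.getD x 0 = 0
    · have hzb : dgZeros U st < dgFuelA X Rd := by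
        have : dgZeros U st ≤ U.length := List.countP_le_length
        have hlen : U.length = (PySem.List.dedup (X ++ Rd.values.flatten)).length := by
          rw [hUdef]
        unfold dgFuelA
        omega
      have htot := (dgTot Rd Gd U hU (dgFuelA X Rd)).1 x st
        (hmem x List.mem_cons_self) hx0 hzb
      cases ht : dgTravA Rd Gd (dgFuelA X Rd) x st with
      | none => rw [ht] at htot; cases htot
      | some r =>
        have hbase : dgRunB Rd Gd 1 [] r = some r := by rw [dgRunB]
        have child := (dgSIM Rd Gd E hE (dgFuelA X Rd)).1 x st r ht [] 1 r hbase
        have hfb : dgFuelB ((Rd.values.map List.length).sum) (dgFuelA X Rd) + 1 =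
            1 + dgFuelB E (dgFuelA X Rd) := by rw [hEdef]; omega
        have hstepA : (if st.N.getD x 0 = 0 then some r else some st) = some r := if_pos hx0
        have hstepB : (if st.N.getD x 0 = 0 then
                dgRunB Rd Gd (dgFuelB ((Rd.values.map List.length).sum) (dgFuelA X Rd) + 1)
                  [(x, ((dgEnter Gd x st).S.length : Int), Rd.getD x [])] (dgEnter Gd x st)
              else some st) = some r := by
          rw [if_pos hx0, hfb]; exact child
        rw [hstepA, hstepB]
        exact ihX r (fun x' hx' => hmem x' (List.mem_cons_of_mem _ hx'))
    · rw [if_neg hx0, if_neg hx0]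
      exact ihX st (fun x' hx' => hmem x' (List.mem_cons_of_mem _ hx'))

-- ===== VERDICT (by name: the statement is the Claim_ definition above) =====
theorem digraph_spec : Claim_equal_digraph := by
  unfold Claim_equal_digraph
  intro X R G _ _
  unfold Spec_digraph digraph digraph_alt
  simp only []
  rw [dg_fold_eq X (PySem.Dict.ofList R) (PySem.Dict.ofList G)
    (PySem.List.dedup (X ++ (PySem.Dict.ofList R).values.flatten)) rfl
    (((PySem.Dict.ofList R).values.map List.length).sum) rfl X _
    (fun x hx => (PySem.List.mem_dedup _ _).mpr (List.mem_append.mpr (Or.inl hx)))]
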